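-- pv_equiv track=rewrite | github.com/testlnord/trends | core/stat/statmodule.py | divergence
-- ===== SOURCE A (Python) =====
-- def divergence(series):
--     result_series = []
--     prev = None
--     for d, v in series:
--         if prev is None:
--             prev = v
--             result_series.append((d, 0))
--         else:
--             result_series.append((d, v - prev))
--             prev = v
--     return result_series
-- ===== SOURCE B (Python) =====
-- def divergence(series):
--     s = list(series)
--     if not s:
--         return []
--     out = []
--     i = len(s) - 1
--     while i > 0:
--         out.append((s[i][0], s[i][1] - s[i - 1][1]))
--         i -= 1
--     out.append((s[0][0], 0))
--     out.reverse()
--     return out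
-- ===== Notes on version B (the rewrite author's own statement) =====
-- stated objective: alternative
-- what changed: Replaced A's forward single pass with a prev/None sentinel by a backward index-driven traversal: walk i from the end down to 1 taking differences by index, emit the results in reverse order, then reverse the list once at the end; no running accumulator of the previous value is kept.
import Mathlib
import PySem

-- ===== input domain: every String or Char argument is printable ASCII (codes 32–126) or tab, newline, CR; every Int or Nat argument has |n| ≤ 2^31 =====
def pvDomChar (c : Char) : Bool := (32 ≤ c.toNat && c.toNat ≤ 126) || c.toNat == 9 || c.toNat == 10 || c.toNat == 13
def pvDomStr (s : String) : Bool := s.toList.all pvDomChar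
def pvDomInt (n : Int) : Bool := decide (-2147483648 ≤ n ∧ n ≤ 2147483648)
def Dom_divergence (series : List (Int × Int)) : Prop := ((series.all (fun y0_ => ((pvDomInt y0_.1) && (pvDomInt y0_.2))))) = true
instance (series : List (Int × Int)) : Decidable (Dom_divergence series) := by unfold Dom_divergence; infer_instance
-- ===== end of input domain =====

-- B replaces A's forward prev/None-sentinel pass by a backward index walk (i from the end down to 1), emitting the differences in reverse and reversing once at the end (alternative decomposition; same cost).

-- ===== PORT A =====
-- A's loop: state is (result_series, prev : Option Int); branch on prev as in the Python.
def divergenceStep (st : List (Int × Int) × Option Int) (dv : Int × Int) :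
    List (Int × Int) × Option Int :=
  match st.2 with
  | none => (st.1 ++ [(dv.1, 0)], some dv.2)
  | some prev => (st.1 ++ [(dv.1, dv.2 - prev)], some dv.2)

def divergence (series : List (Int × Int)) : List (Int × Int) :=
  (series.foldl divergenceStep ([], none)).1

-- ===== PORT B =====
-- Source B's while loop 'while i > 0: out.append((s[i][0], s[i][1] - s[i-1][1])); i -= 1':
-- altLoop s i is the list appended to out by the loop run from counter i down to 1.
def altLoop (s : List (Int × Int)) : Nat → List (Int × Int)
  | 0 => []
  | j + 1 =>
      ((PySem.List.pyGetD s ((j : Int) + 1) (0, 0)).1,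
       (PySem.List.pyGetD s ((j : Int) + 1) (0, 0)).2 -
       (PySem.List.pyGetD s (j : Int) (0, 0)).2) :: altLoop s j

-- Source B: materialize, empty check, backward while loop, append (s[0][0], 0), reverse.
def divergence_alt (series : List (Int × Int)) : List (Int × Int) :=
  match series with
  | [] => []
  | _ =>
      ((altLoop series (series.length - 1)) ++
        [((PySem.List.pyGetD series 0 (0, 0)).1, 0)]).reverse

-- ===== PRECONDITION & SPEC =====
def Spec_divergence (series : List (Int × Int)) (out : List (Int × Int)) : Prop := out = divergence_alt series
instance (series : List (Int × Int)) (out : List (Int × Int)) : Decidable (Spec_divergence series out) := by unfold Spec_divergence; infer_instance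

-- ===== CLAIM (what is proved, stated in full; the proofs are below) =====
def Claim_equal_divergence : Prop := ∀ (series : List (Int × Int)), Dom_divergence series → Spec_divergence series (divergence series)

-- ===== LEMMAS AND PROOFS =====
-- A's fold, once prev is set, produces the pairwise differences.
lemma divergence_fold_some (l : List (Int × Int)) :
    ∀ (acc : List (Int × Int)) (x : Int × Int),
      (l.foldl divergenceStep (acc, some x.2)).1 =
        acc ++ List.zipWith (fun p q => (q.1, q.2 - p.2)) (x :: l) l := by
  induction l with
  | nil => intro acc x; simp
  | cons hd t ih =>
      intro acc x
      simp only [List.foldl_cons, divergenceStep, List.zipWith]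
      rw [ih (acc ++ [(hd.1, hd.2 - x.2)]) hd]
      simp

-- B's backward loop from counter k is the reverse of the first k pairwise differences.
lemma altLoop_eq_take_reverse (s : List (Int × Int)) (k : Nat) (hk : k + 1 ≤ s.length) :
    altLoop s k =
      ((List.zipWith (fun p q => (q.1, q.2 - p.2)) s s.tail).take k).reverse := by
  induction k with
  | zero => simp [altLoop]
  | succ j ih =>
      have hj : j + 1 ≤ s.length := by omega
      have hzw : j < (List.zipWith (fun p q => (q.1, q.2 - p.2)) s s.tail).length := by
        simp [List.length_zipWith, List.length_tail]; omega
      rw [altLoop, ih hj, List.take_add_one, List.getElem?_eq_getElem hzw]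
      have h1 : ((j : Int) + 1) = ((j + 1 : Nat) : Int) := by push_cast; ring
      have hj1 : j + 1 < s.length := by omega
      have hj0 : j < s.length := by omega
      rw [h1, PySem.List.pyGetD_natCast, PySem.List.pyGetD_natCast,
        List.getD_eq_getElem _ _ hj1, List.getD_eq_getElem _ _ hj0]
      simp [List.getElem_zipWith, List.getElem_tail]

-- ===== VERDICT (by name: the statement is the Claim_ definition above) =====
theorem divergence_spec : Claim_equal_divergence := by
  intro series _
  unfold Spec_divergence divergence divergence_alt
  cases series with
  | nil => simp
  | cons hd t =>
      obtain ⟨d0, v0⟩ := hd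
      simp only [List.foldl_cons, divergenceStep, List.nil_append]
      rw [show (v0 : Int) = ((d0, v0) : Int × Int).2 from rfl,
        divergence_fold_some t [(d0, 0)] (d0, v0)]
      have hlen : ((d0, v0) :: t).length - 1 + 1 ≤ ((d0, v0) :: t).length := by
        simp
      rw [altLoop_eq_take_reverse _ _ hlen]
      simp [PySem.List.pyGetD_zero_cons]
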